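-- pv_equiv track=rewrite | github.com/naturalstupid/PyJHora | jhora/utils.py | closest_elements
-- ===== SOURCE A (Python) =====
-- def closest_elements(arr1, arr2):
--     """
--         Returns closest elements between arr1 and arr2
--         Note: It assumes no two elements within an array are identical
--     """
--     result = []
--     for a1 in arr1:
--         for a2 in arr2:
--             if a1 != a2:
--                 if a1 > a2:
--                     result.append([a1, a2, a1-a2])
--                 else:
--                     result.append([a1, a2, a2-a1])
--     return sorted(result, key=lambda i:i[-1])[0][:2]
-- ===== SOURCE B (Python) =====
-- def closest_elements(arr1, arr2):
--     """Same result as A: the first pair (in arr1-major, arr2-minor order) of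
--     distinct elements with minimal absolute difference, as [a1, a2].
--     One pass with a running minimum instead of building and sorting all pairs."""
--     best = None  # (a1, a2, diff)
--     for a1 in arr1:
--         for a2 in arr2:
--             if a1 != a2:
--                 d = a1 - a2 if a1 > a2 else a2 - a1
--                 if best is None or d < best[2]:
--                     best = (a1, a2, d)
--     return [best[0], best[1]]
-- ===== Notes on version B (the rewrite author's own statement) =====
-- stated objective: faster
-- what changed: Replaces building the full n*m pair list and stably sorting it by diff with a single pass over the pairs that tracks the first strictly-smaller running minimum (same tie-break as the stable sort).
import Mathlib
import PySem

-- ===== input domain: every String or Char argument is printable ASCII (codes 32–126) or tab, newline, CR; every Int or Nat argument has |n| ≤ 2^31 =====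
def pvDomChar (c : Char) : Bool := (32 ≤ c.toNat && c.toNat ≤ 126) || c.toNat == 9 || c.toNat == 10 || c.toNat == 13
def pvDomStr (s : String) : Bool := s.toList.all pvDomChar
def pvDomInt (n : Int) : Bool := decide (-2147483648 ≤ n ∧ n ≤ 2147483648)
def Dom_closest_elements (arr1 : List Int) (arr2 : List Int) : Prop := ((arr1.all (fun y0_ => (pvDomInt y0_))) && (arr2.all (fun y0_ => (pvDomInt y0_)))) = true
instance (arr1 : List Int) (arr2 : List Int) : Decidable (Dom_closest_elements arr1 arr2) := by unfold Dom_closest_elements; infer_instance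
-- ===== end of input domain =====

-- B replaces 'build all n*m pairs, stable-sort by diff, take the first' with a single
-- pass over the pairs keeping the first strictly-smaller running minimum (same tie-break).

-- ===== PORT A =====
def closest_elements (arr1 : List Int) (arr2 : List Int) : List Int :=
  match PySem.List.sorted
      (arr1.foldl (fun acc a1 =>
        arr2.foldl (fun acc2 a2 =>
          if a1 ≠ a2 then
            acc2 ++ [(a1, a2, if a1 > a2 then a1 - a2 else a2 - a1)]
          else acc2) acc) [])
      (fun i => i.2.2) false with
  | [] => []            -- Python raises IndexError here; excluded by Pre_
  | p :: _ => [p.1, p.2.1]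

-- ===== PORT B =====
-- the running-minimum update: 'if best is None or d < best[2]: best = (a1, a2, d)'
def pvBest (b : Option (Int × Int × Int)) (t : Int × Int × Int) : Option (Int × Int × Int) :=
  match b with
  | none => some t
  | some q => if t.2.2 < q.2.2 then some t else some q

def closest_elements_alt (arr1 : List Int) (arr2 : List Int) : List Int :=
  match arr1.foldl (fun b a1 =>
      arr2.foldl (fun b2 a2 =>
        if a1 ≠ a2 then
          pvBest b2 (a1, a2, if a1 > a2 then a1 - a2 else a2 - a1)
        else b2) b) none with
  | none => []          -- Python B raises TypeError here; excluded by Pre_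
  | some q => [q.1, q.2.1]

-- ===== PRECONDITION & SPEC =====
-- exactly the inputs on which Python A returns: some pair of distinct elements exists
def Pre_closest_elements (arr1 : List Int) (arr2 : List Int) : Prop :=
  ∃ a1 ∈ arr1, ∃ a2 ∈ arr2, a1 ≠ a2
instance (arr1 : List Int) (arr2 : List Int) : Decidable (Pre_closest_elements arr1 arr2) := by
  unfold Pre_closest_elements; infer_instance

def pvWitness_closest_elements : List Int × List Int := ([0, 3], [1, 7])

def Spec_closest_elements (arr1 : List Int) (arr2 : List Int) (out : List Int) : Prop := out = closest_elements_alt arr1 arr2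
instance (arr1 : List Int) (arr2 : List Int) (out : List Int) : Decidable (Spec_closest_elements arr1 arr2 out) := by unfold Spec_closest_elements; infer_instance

-- ===== CLAIM (what is proved, stated in full; the proofs are below) =====
def Claim_equal_closest_elements : Prop := ∀ (arr1 : List Int) (arr2 : List Int), Dom_closest_elements arr1 arr2 → Pre_closest_elements arr1 arr2 → Spec_closest_elements arr1 arr2 (closest_elements arr1 arr2)

-- ===== LEMMAS AND PROOFS =====

-- head of one stable insertion step = one running-minimum step
lemma head_insertBy (ys : List (Int × Int × Int)) (x : Int × Int × Int) :
    (PySem.List.insertBy (fun a b => decide (a.2.2 < b.2.2)) x ys).head? =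
      pvBest ys.head? x := by
  cases ys with
  | nil => simp [PySem.List.insertBy, pvBest]
  | cons y t =>
    simp only [PySem.List.insertBy, pvBest]
    by_cases h : x.2.2 < y.2.2 <;> simp [h]

-- head of the whole insertion-sort fold = the running-minimum fold
lemma head_foldl_insertBy (l : List (Int × Int × Int)) (acc : List (Int × Int × Int)) :
    (l.foldl (fun a x => PySem.List.insertBy (fun a b => decide (a.2.2 < b.2.2)) x a) acc).head? =
      l.foldl pvBest acc.head? := by
  induction l generalizing acc with
  | nil => rfl
  | cons x t ih => simp only [List.foldl]; rw [ih, head_insertBy]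

-- B's inner loop tracks exactly the running minimum of the pair list A's inner loop builds
lemma sim_inner (l : List Int) (a1 : Int) (acc : List (Int × Int × Int)) :
    (l.foldl (fun b2 a2 =>
        if a1 ≠ a2 then
          pvBest b2 (a1, a2, if a1 > a2 then a1 - a2 else a2 - a1)
        else b2) (acc.foldl pvBest none)) =
      (l.foldl (fun acc2 a2 =>
        if a1 ≠ a2 then
          acc2 ++ [(a1, a2, if a1 > a2 then a1 - a2 else a2 - a1)]
        else acc2) acc).foldl pvBest none := by
  induction l generalizing acc with
  | nil => rfl
  | cons a2 t ih =>
    simp only [List.foldl]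
    by_cases h : a1 = a2
    · rw [if_neg (by simp [h]), if_neg (by simp [h])]
      exact ih acc
    · rw [if_pos h, if_pos h]
      have hstep := ih (acc ++ [(a1, a2, if a1 > a2 then a1 - a2 else a2 - a1)])
      rw [List.foldl_append] at hstep
      simpa using hstep

-- and so does B's outer loop, over A's whole pair list
lemma sim_outer (l1 l2 : List Int) (acc : List (Int × Int × Int)) :
    (l1.foldl (fun b a1 =>
        l2.foldl (fun b2 a2 =>
          if a1 ≠ a2 then
            pvBest b2 (a1, a2, if a1 > a2 then a1 - a2 else a2 - a1)
          else b2) b) (acc.foldl pvBest none)) =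
      (l1.foldl (fun acc' a1 =>
        l2.foldl (fun acc2 a2 =>
          if a1 ≠ a2 then
            acc2 ++ [(a1, a2, if a1 > a2 then a1 - a2 else a2 - a1)]
          else acc2) acc') acc).foldl pvBest none := by
  induction l1 generalizing acc with
  | nil => rfl
  | cons a1 t ih =>
    simp only [List.foldl]
    rw [sim_inner, ih]

-- ===== VERDICT (by name: the statement is the Claim_ definition above) =====
theorem closest_elements_spec : Claim_equal_closest_elements := by
  intro arr1 arr2 _ _
  unfold Spec_closest_elements closest_elements closest_elements_alt
  have hB := sim_outer arr1 arr2 ([] : List (Int × Int × Int))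
  simp only [List.foldl] at hB
  rw [hB]
  have hA := head_foldl_insertBy
    (arr1.foldl (fun acc a1 =>
      arr2.foldl (fun acc2 a2 =>
        if a1 ≠ a2 then
          acc2 ++ [(a1, a2, if a1 > a2 then a1 - a2 else a2 - a1)]
        else acc2) acc) []) []
  rw [← PySem.List.sorted_eq_foldl_insertBy] at hA
  cases hs : PySem.List.sorted
      (arr1.foldl (fun acc a1 =>
        arr2.foldl (fun acc2 a2 =>
          if a1 ≠ a2 then
            acc2 ++ [(a1, a2, if a1 > a2 then a1 - a2 else a2 - a1)]
          else acc2) acc) []) (fun i => i.2.2) false with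
  | nil =>
    rw [hs] at hA
    simp only [List.head?_nil] at hA
    rw [← hA]
  | cons p rest =>
    rw [hs] at hA
    simp only [List.head?_nil, List.head?_cons] at hA
    rw [← hA]
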